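-- pv_equiv track=rewrite | github.com/runshengdu/aa_lcr_exp | src/aa_lcr.py | count_stats_4a
-- ===== SOURCE A (Python) =====
-- from typing import Any, Tuple
--
-- def count_stats_4a(data_objects: list[dict[str, Any]]) -> tuple[int, int]:
--     """
--     决策 4A: total 仅统计已有最终 judge 的题（CORRECT/INCORRECT/UNKNOWN）；
--     correct 为其中 CORRECT 数。未评估（空）与 ERROR、SKIPPED 等不计入 total。
--     """
--     scorable = {"CORRECT", "INCORRECT", "UNKNOWN"}
--     tot = 0
--     cor = 0
--     for o in data_objects:
--         jr = o.get("judge_result")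
--         if not isinstance(jr, str) or jr not in scorable:
--             continue
--         tot += 1
--         if jr == "CORRECT":
--             cor += 1
--     return cor, tot
-- ===== SOURCE B (Python) =====
-- def count_stats_4a(data_objects: list) -> tuple:
--     # Histogram strategy: tally every string judge_result into a frequency table
--     # in one pass, then read (CORRECT, INCORRECT, UNKNOWN) buckets at the end.
--     counts = {}
--     for o in data_objects:
--         jr = o.get("judge_result")
--         if isinstance(jr, str):
--             counts[jr] = counts.get(jr, 0) + 1
--     cor = counts.get("CORRECT", 0)
--     tot = cor + counts.get("INCORRECT", 0) + counts.get("UNKNOWN", 0)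
--     return cor, tot
-- ===== Notes on version B (the rewrite author's own statement) =====
-- stated objective: alternative
-- what changed: Replaces the per-element membership test against the scorable set and two running counters with a frequency histogram (dict) of all string judge_result values, from which cor and tot are read as three bucket lookups at the end.
import Mathlib
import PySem

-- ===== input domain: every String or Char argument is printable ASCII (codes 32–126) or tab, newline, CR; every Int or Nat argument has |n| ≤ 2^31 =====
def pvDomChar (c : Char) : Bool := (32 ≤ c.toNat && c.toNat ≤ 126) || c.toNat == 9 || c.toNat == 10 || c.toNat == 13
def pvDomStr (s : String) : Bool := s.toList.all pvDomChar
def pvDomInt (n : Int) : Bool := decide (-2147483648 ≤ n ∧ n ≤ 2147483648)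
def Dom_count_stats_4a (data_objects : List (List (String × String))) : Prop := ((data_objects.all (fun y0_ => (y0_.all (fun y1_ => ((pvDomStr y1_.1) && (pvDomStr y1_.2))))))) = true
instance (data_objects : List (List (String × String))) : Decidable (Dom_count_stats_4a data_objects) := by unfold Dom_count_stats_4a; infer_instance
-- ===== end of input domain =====

-- B replaces A's per-element scorable-set test with two running counters by a frequency
-- histogram of all judge_result values read out in three bucket lookups; objective: alternative.

-- ===== PORT A =====
-- A: one pass, membership test against the scorable set, two integer accumulators (cor, tot).
def count_stats_4a (data_objects : List (List (String × String))) : Int × Int :=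
  let scorable : PySem.Set String := PySem.Set.ofList ["CORRECT", "INCORRECT", "UNKNOWN"]
  let st := data_objects.foldl (fun (st : Int × Int) o =>
    match (PySem.Dict.mk o).get? "judge_result" with
    | none => st
    | some jr =>
      if jr ∉ scorable then st
      else ((if jr = "CORRECT" then st.1 + 1 else st.1), st.2 + 1)) (0, 0)
  (st.1, st.2)

-- ===== PORT B =====
-- B: build the histogram counts[jr] += 1 of all judge_result values, then read three buckets.
-- (the Python isinstance(jr, str) guard is vacuous here: values are Strings by the type convention)
def count_stats_4a_alt (data_objects : List (List (String × String))) : Int × Int :=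
  let counts := data_objects.foldl (fun (d : PySem.Dict String Int) o =>
    match (PySem.Dict.mk o).get? "judge_result" with
    | none => d
    | some jr => d.modify jr 0 (· + 1)) PySem.Dict.empty
  let cor := counts.getD "CORRECT" 0
  (cor, cor + counts.getD "INCORRECT" 0 + counts.getD "UNKNOWN" 0)

-- ===== PRECONDITION & SPEC =====
def Spec_count_stats_4a (data_objects : List (List (String × String))) (out : Int × Int) : Prop := out = count_stats_4a_alt data_objects
instance (data_objects : List (List (String × String))) (out : Int × Int) : Decidable (Spec_count_stats_4a data_objects out) := by unfold Spec_count_stats_4a; infer_instance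

-- ===== CLAIM =====
def Claim_equal_count_stats_4a : Prop := ∀ (data_objects : List (List (String × String))), Dom_count_stats_4a data_objects → Spec_count_stats_4a data_objects (count_stats_4a data_objects)

-- ===== LEMMAS AND PROOFS =====

-- the judge_result values of the input, in order (no scorable filtering)
def pvVals (l : List (List (String × String))) : List String :=
  l.filterMap (fun o => (PySem.Dict.mk o).get? "judge_result")

lemma pvVals_cons (o : List (String × String)) (rest : List (List (String × String))) :
    pvVals (o :: rest)
      = (match (PySem.Dict.mk o).get? "judge_result" with
         | none => pvVals rest
         | some jr => jr :: pvVals rest) := by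
  unfold pvVals
  cases hj : (PySem.Dict.mk o).get? "judge_result" <;> simp [hj]

-- A's fold computes, over the three scorable strings, (count CORRECT, count of all three)
lemma foldA_eq (l : List (List (String × String))) (c t : Int) :
    l.foldl (fun (st : Int × Int) o =>
      match (PySem.Dict.mk o).get? "judge_result" with
      | none => st
      | some jr =>
        if jr ∉ PySem.Set.ofList ["CORRECT", "INCORRECT", "UNKNOWN"] then st
        else ((if jr = "CORRECT" then st.1 + 1 else st.1), st.2 + 1)) (c, t)
    = (c + ((pvVals l).count "CORRECT" : Int),
       t + ((pvVals l).count "CORRECT" : Int) + ((pvVals l).count "INCORRECT" : Int)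
         + ((pvVals l).count "UNKNOWN" : Int)) := by
  induction l generalizing c t with
  | nil => simp [pvVals]
  | cons o rest ih =>
    rw [List.foldl_cons, pvVals_cons]
    cases hj : (PySem.Dict.mk o).get? "judge_result" with
    | none => simpa using ih c t
    | some jr =>
      simp only []
      by_cases hm : jr ∈ PySem.Set.ofList ["CORRECT", "INCORRECT", "UNKNOWN"]
      · rw [if_neg (not_not_intro hm)]
        have : jr = "CORRECT" ∨ jr = "INCORRECT" ∨ jr = "UNKNOWN" := by
          simpa [PySem.Set.mem_ofList] using hm
        rcases this with h | h | h <;> subst h <;>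
          · rw [ih]
            simp [Prod.ext_iff]
            omega
      · have h1 : jr ≠ "CORRECT" := by rintro rfl; exact hm (by decide)
        have h2 : jr ≠ "INCORRECT" := by rintro rfl; exact hm (by decide)
        have h3 : jr ≠ "UNKNOWN" := by rintro rfl; exact hm (by decide)
        rw [if_pos hm, ih]
        simp [h1, h2, h3]

-- B's fold is the Counter loop over pvVals
lemma foldB_eq (l : List (List (String × String))) (d : PySem.Dict String Int) :
    l.foldl (fun (d : PySem.Dict String Int) o =>
      match (PySem.Dict.mk o).get? "judge_result" with
      | none => d
      | some jr => d.modify jr 0 (· + 1)) d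
    = (pvVals l).foldl (fun d x => d.modify x 0 (· + 1)) d := by
  induction l generalizing d with
  | nil => simp [pvVals]
  | cons o rest ih =>
    rw [List.foldl_cons, pvVals_cons]
    cases hj : (PySem.Dict.mk o).get? "judge_result" with
    | none => exact ih d
    | some jr => rw [List.foldl_cons]; exact ih _

-- ===== VERDICT =====
theorem count_stats_4a_spec : Claim_equal_count_stats_4a := by
  intro data_objects _
  unfold Spec_count_stats_4a count_stats_4a count_stats_4a_alt
  simp only []
  rw [foldA_eq, foldB_eq, ← PySem.Dict.counter_eq_foldl]
  simp [PySem.Dict.getD_counter]
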